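-- pv_equiv track=rewrite | github.com/ChileWang0228/team_homework | 2018-11-11_古诗文爬虫/poem_spider/poem_spider/spiders/poem_spider.py | format_famous_poem
-- ===== SOURCE A (Python) =====
-- def format_famous_poem(author_famous_poem, author_name):
--     """
--     格式化后的名句集
--     :param author_famous_poem: 名句集合
--     :param author_name:
--     :return:
--     """
--     author_famous_poem_set = []
--     temp = ''
--     for i in range(len(author_famous_poem)):
--         temp += author_famous_poem[i] + '。 '
--         if author_famous_poem[i] == author_name:
--             i += 1
--             temp += (' <<' + author_famous_poem[i] + '>> \n')
--             author_famous_poem_set.append(temp)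
--             temp = ''
--
--     fina_famous_poem_set = ''
--     for i in range(len(author_famous_poem_set)):
--         fina_famous_poem_set += (author_famous_poem_set[i] + '\n')
--
--     return fina_famous_poem_set
-- ===== SOURCE B (Python) =====
-- def format_famous_poem(author_famous_poem, author_name):
--     """Segment-based reformulation: find match positions once, then emit one block per match."""
--     idxs = [i for i, e in enumerate(author_famous_poem) if e == author_name]
--     blocks = []
--     start = 0
--     for idx in idxs:
--         block = ''.join(e + '。 ' for e in author_famous_poem[start:idx + 1])
--         block += ' <<' + author_famous_poem[idx + 1] + '>> \n'
--         blocks.append(block)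
--         start = idx + 1
--     return ''.join(b + '\n' for b in blocks)
-- ===== Notes on version B (the rewrite author's own statement) =====
-- stated objective: alternative
-- what changed: B first collects the list of indices where the element equals author_name, then emits one block per match by slicing the segment since the previous match and joining it, instead of A's single index scan with a mutating accumulator string followed by a second joining loop.
import Mathlib
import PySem

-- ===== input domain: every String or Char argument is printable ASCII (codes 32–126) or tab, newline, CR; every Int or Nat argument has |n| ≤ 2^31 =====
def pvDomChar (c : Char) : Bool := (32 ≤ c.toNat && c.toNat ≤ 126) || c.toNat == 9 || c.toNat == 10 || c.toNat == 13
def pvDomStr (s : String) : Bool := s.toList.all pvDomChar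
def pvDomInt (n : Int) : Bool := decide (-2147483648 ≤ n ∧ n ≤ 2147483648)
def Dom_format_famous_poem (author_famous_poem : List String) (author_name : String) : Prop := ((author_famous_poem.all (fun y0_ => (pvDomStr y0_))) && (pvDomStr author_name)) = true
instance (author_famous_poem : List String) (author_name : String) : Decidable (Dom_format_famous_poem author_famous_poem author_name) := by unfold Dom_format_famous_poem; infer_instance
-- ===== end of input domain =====

-- B replaces A's single accumulating scan by a different decomposition: collect the match
-- positions once, then build one block per match from a slice of the list (objective: alternative).


-- ===== PORT A =====
def format_famous_poem (author_famous_poem : List String) (author_name : String) : String :=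
  let st := (PySem.List.pyRange 0 (PySem.List.len author_famous_poem) 1).foldl
    (fun (st : List String × String) i =>
      let temp := st.2 ++ (PySem.List.pyGetD author_famous_poem i "" ++ "。 ")
      if PySem.List.pyGetD author_famous_poem i "" == author_name then
        (st.1 ++ [temp ++ (" <<" ++ PySem.List.pyGetD author_famous_poem (i + 1) "" ++ ">> \n")], "")
      else (st.1, temp))
    ([], "")
  (PySem.List.pyRange 0 (PySem.List.len st.1) 1).foldl
    (fun acc i => acc ++ (PySem.List.pyGetD st.1 i "" ++ "\n")) ""

-- ===== PORT B =====
-- ''.join(…) (empty separator) is ported as String.join (plain concatenation; exact).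
def format_famous_poem_alt (author_famous_poem : List String) (author_name : String) : String :=
  let idxs := (PySem.List.enumerate author_famous_poem 0).filterMap
    (fun p => if p.2 == author_name then some p.1 else none)
  let st := idxs.foldl
    (fun (st : List String × Int) idx =>
      let block := String.join ((PySem.List.slice author_famous_poem (some st.2) (some (idx + 1))).map
          (fun e => e ++ "。 "))
        ++ (" <<" ++ PySem.List.pyGetD author_famous_poem (idx + 1) "" ++ ">> \n")
      (st.1 ++ [block], idx + 1))
    ([], 0)
  String.join (st.1.map (fun b => b ++ "\n"))

-- ===== PRECONDITION & SPEC =====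
-- Pre_ excludes exactly the inputs on which Python A raises IndexError: a non-empty list whose
-- LAST element equals author_name (the loop then reads author_famous_poem[len(...)]).
def Pre_format_famous_poem (author_famous_poem : List String) (author_name : String) : Prop :=
  author_famous_poem.getLast? ≠ some author_name
instance (author_famous_poem : List String) (author_name : String) : Decidable (Pre_format_famous_poem author_famous_poem author_name) := by unfold Pre_format_famous_poem; infer_instance

def pvWitness_format_famous_poem : List String × String := (["a", "x", "b"], "x")

def Spec_format_famous_poem (author_famous_poem : List String) (author_name : String) (out : String) : Prop := out = format_famous_poem_alt author_famous_poem author_name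
instance (author_famous_poem : List String) (author_name : String) (out : String) : Decidable (Spec_format_famous_poem author_famous_poem author_name out) := by unfold Spec_format_famous_poem; infer_instance

-- ===== CLAIM (what is proved, stated in full; the proofs are below) =====
def Claim_equal_format_famous_poem : Prop := ∀ (author_famous_poem : List String) (author_name : String), Dom_format_famous_poem author_famous_poem author_name → Pre_format_famous_poem author_famous_poem author_name → Spec_format_famous_poem author_famous_poem author_name (format_famous_poem author_famous_poem author_name)

-- ===== LEMMAS AND PROOFS =====

theorem pv_foldl_concat (l : List String) : ∀ init : String,
    l.foldl (fun a x => a ++ x) init = init ++ l.foldl (fun a x => a ++ x) "" := by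
  induction l with
  | nil => intro init; simp [String.append_empty]
  | cons x l ih =>
    intro init
    simp only [List.foldl_cons]
    rw [ih (init ++ x), ih ("" ++ x), String.empty_append, String.append_assoc]

theorem pv_join_cons (s : String) (l : List String) :
    String.join (s :: l) = s ++ String.join l := by
  show List.foldl (fun a x => a ++ x) ("" ++ s) l = _
  rw [String.empty_append, pv_foldl_concat l s]; rfl

theorem pv_join_append (l₁ l₂ : List String) :
    String.join (l₁ ++ l₂) = String.join l₁ ++ String.join l₂ := by
  show List.foldl (fun a x => a ++ x) "" (l₁ ++ l₂) = _
  rw [List.foldl_append, pv_foldl_concat l₂]; rfl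

theorem pv_foldl_str_factor {α : Type} (f : α → String) (l : List α) (init : String) :
    l.foldl (fun a x => a ++ f x) init = init ++ String.join (l.map f) := by
  rw [← List.foldl_map, pv_foldl_concat]; rfl

-- The common recursive description of both outputs: process the suffix carrying the pending text.
def pvR (name : String) : String → List String → String
  | _, [] => ""
  | pending, x :: rest =>
    if x == name then
      pending ++ (x ++ "。 ") ++ (" <<" ++ rest.headD "" ++ ">> \n") ++ "\n" ++ pvR name "" rest
    else pvR name (pending ++ (x ++ "。 ")) rest

theorem pv_A_loop (xs : List String) (name : String) :
    ∀ (k s : Nat), s + k = xs.length → ∀ (set : List String) (temp : String),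
      String.join ((((PySem.List.pyRange (s : Int) ((xs.length : Nat) : Int) 1).foldl
        (fun (st : List String × String) i =>
          let temp := st.2 ++ (PySem.List.pyGetD xs i "" ++ "。 ")
          if PySem.List.pyGetD xs i "" == name then
            (st.1 ++ [temp ++ (" <<" ++ PySem.List.pyGetD xs (i + 1) "" ++ ">> \n")], "")
          else (st.1, temp)) (set, temp)).1).map (fun b => b ++ "\n"))
      = String.join (set.map (fun b => b ++ "\n")) ++ pvR name temp (xs.drop s) := by
  intro k
  induction k with
  | zero =>
    intro s hs set temp
    rw [PySem.List.pyRange_one_eq_nil (by omega)]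
    rw [List.drop_eq_nil_of_le (by omega)]
    simp only [List.foldl_nil, pvR, String.append_empty]
  | succ k ih =>
    intro s hs set temp
    have hlt : s < xs.length := by omega
    rw [PySem.List.pyRange_one_cons (by exact_mod_cast Nat.cast_lt.mpr hlt)]
    rw [List.drop_eq_getElem_cons hlt]
    simp only [List.foldl_cons]
    have hget : PySem.List.pyGetD xs (s : Int) "" = xs[s] := by
      rw [PySem.List.pyGetD_natCast, List.getD_eq_getElem xs "" hlt]
    have hget1 : PySem.List.pyGetD xs ((s : Int) + 1) "" = (xs.drop (s+1)).headD "" := by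
      have : ((s : Int) + 1) = ((s + 1 : Nat) : Int) := by push_cast; ring
      rw [this, PySem.List.pyGetD_natCast]
      rw [List.headD_eq_head?_getD, List.head?_drop]
      rfl
    rw [hget, hget1]
    have hcast : (s : Int) + 1 = ((s + 1 : Nat) : Int) := by push_cast; ring
    rw [hcast]
    by_cases h : xs[s] == name
    · simp only [h, if_true, pvR]
      rw [ih (s+1) (by omega)]
      rw [List.map_append, pv_join_append, List.map_cons, List.map_nil, pv_join_cons]
      simp [String.append_assoc]
      rfl
    · rw [Bool.not_eq_true] at h
      simp only [h, Bool.false_eq_true, if_false, pvR]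
      rw [ih (s+1) (by omega)]

theorem pv_take_split (xs : List String) (s t : Nat) (ht : t ≤ s) (hlt : s < xs.length) :
    (xs.drop t).take (s + 1 - t) = (xs.drop t).take (s - t) ++ [xs[s]] := by
  have h1 : s + 1 - t = (s - t) + 1 := by omega
  rw [h1, List.take_add_one]
  have h2 : (xs.drop t)[s - t]? = some xs[s] := by
    rw [List.getElem?_drop]
    rw [List.getElem?_eq_getElem (by omega)]
    congr 1
    congr 1
    omega
  rw [h2]
  rfl

theorem pv_B_loop (xs : List String) (name : String) :
    ∀ (k s t : Nat), s + k = xs.length → t ≤ s → ∀ (blocks : List String),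
      String.join (((((PySem.List.enumerate (xs.drop s) (s : Int)).filterMap
          (fun p => if p.2 == name then some p.1 else none)).foldl
        (fun (st : List String × Int) idx =>
          let block := String.join ((PySem.List.slice xs (some st.2) (some (idx + 1))).map
              (fun e => e ++ "。 "))
            ++ (" <<" ++ PySem.List.pyGetD xs (idx + 1) "" ++ ">> \n")
          (st.1 ++ [block], idx + 1)) (blocks, (t : Int))).1).map (fun b => b ++ "\n"))
      = String.join (blocks.map (fun b => b ++ "\n"))
        ++ pvR name (String.join (((xs.drop t).take (s - t)).map (fun e => e ++ "。 "))) (xs.drop s) := by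
  intro k
  induction k with
  | zero =>
    intro s t hs ht blocks
    rw [List.drop_eq_nil_of_le (by omega)]
    simp only [PySem.List.enumerate_nil, List.filterMap_nil, List.foldl_nil, pvR,
      String.append_empty]
  | succ k ih =>
    intro s t hs ht blocks
    have hlt : s < xs.length := by omega
    rw [List.drop_eq_getElem_cons hlt]
    rw [PySem.List.enumerate_cons]
    rw [List.filterMap_cons]
    have hget1 : PySem.List.pyGetD xs ((s : Int) + 1) "" = (xs.drop (s+1)).headD "" := by
      have hc : ((s : Int) + 1) = ((s + 1 : Nat) : Int) := by push_cast; ring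
      rw [hc, PySem.List.pyGetD_natCast, List.headD_eq_head?_getD, List.head?_drop]; rfl
    have hcast : (s : Int) + 1 = ((s + 1 : Nat) : Int) := by push_cast; ring
    by_cases h : xs[s] == name
    · simp only [h, if_true, List.foldl_cons]
      have hsl : PySem.List.slice xs (some (t : Int)) (some ((s : Int) + 1)) =
          (xs.drop t).take (s + 1 - t) := by
        rw [hcast, PySem.List.slice_natCast]
      rw [hsl, hget1, hcast]
      rw [ih (s+1) (s+1) (by omega) (le_refl _)]
      rw [pv_take_split xs s t ht hlt]
      simp only [Nat.sub_self, List.take_zero, List.map_nil, List.map_append, pv_join_append,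
        List.map_cons, pv_join_cons]
      rw [pvR]
      simp only [h, if_true]
      simp [String.append_assoc]
      rfl
    · rw [Bool.not_eq_true] at h
      simp only [h, Bool.false_eq_true, if_false]
      rw [hcast]
      rw [ih (s+1) t (by omega) (by omega)]
      rw [pvR]
      simp only [h, Bool.false_eq_true, if_false]
      rw [pv_take_split xs s t ht hlt]
      simp only [List.map_append, pv_join_append, List.map_cons, List.map_nil, pv_join_cons]
      rw [show String.join ([] : List String) = "" from rfl, String.append_empty]

theorem pv_final (xs : List String) (name : String) :
    format_famous_poem xs name = format_famous_poem_alt xs name := by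
  have hA := pv_A_loop xs name xs.length 0 (by omega) [] ""
  have hB := pv_B_loop xs name xs.length 0 0 (by omega) (le_refl 0) []
  simp only [Nat.cast_zero, List.drop_zero, Nat.sub_self, List.take_zero, List.map_nil] at hA hB
  rw [show String.join ([] : List String) = "" from rfl, String.empty_append] at hA hB
  unfold format_famous_poem format_famous_poem_alt
  rw [PySem.List.foldl_pyRange_zero_pyGetD _ "" (fun acc x => acc ++ (x ++ "\n")) ""]
  rw [pv_foldl_str_factor, String.empty_append]
  simp only [PySem.List.len_eq] at hA ⊢
  rw [hA, hB]

-- ===== VERDICT (by name: the statement is the Claim_ definition above) =====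
theorem format_famous_poem_spec : Claim_equal_format_famous_poem := by
  intro author_famous_poem author_name _ _
  unfold Spec_format_famous_poem
  exact pv_final author_famous_poem author_name
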